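-- pv_equiv track=rewrite | github.com/VadimBir/LLM_SelfAttention_Simulation_SparQ | 000-custom_scripts/deltaTracePrint_BLOCKALIGNED.py | encode_with_patterns
-- ===== SOURCE A (Python) =====
-- def encode_with_patterns(data, patterns):
--     encoded = []
--     skip_until = -1
--
--     # Encode the data using the patterns
--     i = 0
--     while i < len(data):
--         encoded_this_step = False
--         for pattern, idxs in patterns.items():
--             if i in idxs and i > skip_until:
--                 # Encode the pattern
--                 encoded.append(f'pattern_{pattern}')
--                 skip_until = i + len(pattern) - 1
--                 encoded_this_step = True
--                 break
--         if not encoded_this_step: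
--             if i > skip_until:
--                 encoded.append(data[i])
--         i += 1
--
--     return encoded
-- ===== SOURCE B (Python) =====
-- def encode_with_patterns(data, patterns):
--     encoded = []
--     i = 0
--     n = len(data)
--     while i < n:
--         for pattern, idxs in patterns.items():
--             if i in idxs:
--                 encoded.append('pattern_' + pattern)
--                 i += len(pattern) or 1
--                 break
--         else:
--             encoded.append(data[i])
--             i += 1
--     return encoded
-- ===== Notes on version B (the rewrite author's own statement) =====
-- stated objective: alternative
-- what changed: B replaces A's per-index scan with a skip_until sentinel by a while loop with variable-length jumps: after emitting a pattern token it advances i by len(pattern) or 1, so positions covered by an emitted pattern are never visited and the sentinel state disappears.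
import Mathlib
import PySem

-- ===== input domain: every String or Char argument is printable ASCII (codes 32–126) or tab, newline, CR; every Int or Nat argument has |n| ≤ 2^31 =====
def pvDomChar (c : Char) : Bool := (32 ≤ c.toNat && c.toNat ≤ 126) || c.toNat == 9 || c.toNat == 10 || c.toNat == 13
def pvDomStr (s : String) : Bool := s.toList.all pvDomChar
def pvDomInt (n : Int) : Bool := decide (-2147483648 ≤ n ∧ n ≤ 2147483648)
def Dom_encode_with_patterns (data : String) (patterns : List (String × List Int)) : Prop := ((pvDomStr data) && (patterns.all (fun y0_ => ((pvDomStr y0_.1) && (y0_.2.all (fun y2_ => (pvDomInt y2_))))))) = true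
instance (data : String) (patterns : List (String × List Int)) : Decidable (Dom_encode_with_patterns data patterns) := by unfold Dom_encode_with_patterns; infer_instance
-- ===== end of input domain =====

-- B drops A's skip_until sentinel: it jumps i by len(pattern) or 1 after emitting a
-- pattern token, never visiting covered positions (objective: alternative decomposition).

-- ===== PORT A =====
-- inner 'for pattern, idxs in patterns.items(): if i in idxs and i > skip_until: … break'
def findPatA (i skip : Int) : List (String × List Int) → Option String
  | [] => none
  | (p, idxs) :: rest => if i ∈ idxs ∧ i > skip then some p else findPatA i skip rest

-- one iteration of A's while-loop body, state = (encoded, skip_until)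
def stepA (patterns : List (String × List Int)) (cs : List Char)
    (st : List String × Int) (i : Nat) : List String × Int :=
  match findPatA (i : Int) st.2 patterns with
  | some p => (st.1 ++ ["pattern_" ++ p], (i : Int) + (p.toList.length : Int) - 1)
  | none => if st.2 < (i : Int) then (st.1 ++ [(PySem.List.pyGetD cs (i : Int) ' ').toString], st.2) else st

def encode_with_patterns (data : String) (patterns : List (String × List Int)) : List String :=
  ((List.range data.toList.length).foldl (stepA patterns data.toList) ([], -1)).1

-- ===== PORT B =====
-- inner 'for pattern, idxs in patterns.items(): if i in idxs: … break'
def findPatB (i : Int) : List (String × List Int) → Option String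
  | [] => none
  | (p, idxs) :: rest => if i ∈ idxs then some p else findPatB i rest

-- B's while loop: i jumps by 'len(pattern) or 1'; cs is the suffix data[i:]
def goB (patterns : List (String × List Int)) (i : Nat) : List Char → List String
  | [] => []
  | c :: rest =>
    match findPatB (i : Int) patterns with
    | some p =>
        let s := if p.toList.length = 0 then 1 else p.toList.length
        ("pattern_" ++ p) :: goB patterns (i + s) (rest.drop (s - 1))
    | none => c.toString :: goB patterns (i + 1) rest
  termination_by cs => cs.length
  decreasing_by
  all_goals simp

def encode_with_patterns_alt (data : String) (patterns : List (String × List Int)) : List String :=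
  goB patterns 0 data.toList

-- ===== PRECONDITION & SPEC =====
def Spec_encode_with_patterns (data : String) (patterns : List (String × List Int)) (out : List String) : Prop := out = encode_with_patterns_alt data patterns
instance (data : String) (patterns : List (String × List Int)) (out : List String) : Decidable (Spec_encode_with_patterns data patterns out) := by unfold Spec_encode_with_patterns; infer_instance

-- ===== CLAIM (what is proved, stated in full; the proofs are below) =====
def Claim_equal_encode_with_patterns : Prop := ∀ (data : String) (patterns : List (String × List Int)), Dom_encode_with_patterns data patterns → Spec_encode_with_patterns data patterns (encode_with_patterns data patterns)

-- ===== LEMMAS AND PROOFS =====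

-- A's loop as a direct recursion on the index (proof device only)
def runA (patterns : List (String × List Int)) (cs : List Char) (i : Nat) (skip : Int) : List String :=
  if h : i < cs.length then
    match findPatA (i : Int) skip patterns with
    | some p => ("pattern_" ++ p) :: runA patterns cs (i + 1) ((i : Int) + (p.toList.length : Int) - 1)
    | none => (if skip < (i : Int) then [(PySem.List.pyGetD cs (i : Int) ' ').toString] else []) ++ runA patterns cs (i + 1) skip
  else []
  termination_by cs.length - i

lemma foldA (patterns : List (String × List Int)) (cs : List Char) :
    ∀ (k i : Nat) (st : List String × Int), i + k = cs.length →
      ((List.range' i k).foldl (stepA patterns cs) st).1 = st.1 ++ runA patterns cs i st.2 := by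
  intro k
  induction k with
  | zero => intro i st h; rw [runA]; simp [List.range']; omega
  | succ k ih =>
    intro i st h
    have hi : i < cs.length := by omega
    conv_rhs => rw [runA]
    rw [dif_pos hi, List.range'_succ, List.foldl_cons, ih (i + 1) _ (by omega)]
    cases hfp : findPatA (i : Int) st.2 patterns with
    | some p => simp [stepA, hfp]
    | none =>
      by_cases hs : st.2 < (i : Int)
      · simp [stepA, hfp, hs]
      · simp [stepA, hfp, hs]

lemma findPatA_none_of_le (i skip : Int) (h : i ≤ skip) :
    ∀ ps : List (String × List Int), findPatA i skip ps = none := by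
  intro ps
  induction ps with
  | nil => rfl
  | cons hd tl ih =>
    obtain ⟨p, idxs⟩ := hd
    rw [findPatA, if_neg (by intro hc; omega), ih]

lemma findPat_eq (i skip : Int) (h : skip < i) :
    ∀ ps : List (String × List Int), findPatA i skip ps = findPatB i ps := by
  intro ps
  induction ps with
  | nil => rfl
  | cons hd tl ih =>
    obtain ⟨p, idxs⟩ := hd
    rw [findPatA, findPatB]
    by_cases hm : i ∈ idxs
    · rw [if_pos ⟨hm, h⟩, if_pos hm]
    · rw [if_neg (by tauto), if_neg hm, ih]

lemma runA_succ_of_le (patterns : List (String × List Int)) (cs : List Char)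
    (i : Nat) (skip : Int) (h : (i : Int) ≤ skip) :
    runA patterns cs i skip = runA patterns cs (i + 1) skip := by
  rw [runA]
  by_cases hi : i < cs.length
  · simp only [hi, dif_pos, findPatA_none_of_le _ _ h]
    rw [if_neg (by omega)]
    simp
  · simp only [hi, dif_neg, not_false_iff]
    rw [runA, dif_neg (by omega)]

lemma runA_add (patterns : List (String × List Int)) (cs : List Char) :
    ∀ (m i : Nat) (skip : Int), ((i + m : Nat) : Int) ≤ skip + 1 →
      runA patterns cs i skip = runA patterns cs (i + m) skip := by
  intro m
  induction m with
  | zero => intro i skip _; rfl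
  | succ m ih =>
    intro i skip h
    push_cast at h
    rw [runA_succ_of_le patterns cs i skip (by omega)]
    rw [ih (i + 1) skip (by push_cast; omega)]
    congr 1
    omega

lemma runA_eq_goB (patterns : List (String × List Int)) (cs : List Char) :
    ∀ (d i : Nat) (skip : Int), cs.length - i = d → skip < (i : Int) →
      runA patterns cs i skip = goB patterns i (cs.drop i) := by
  intro d
  induction d using Nat.strong_induction_on with
  | _ d ih =>
    intro i skip hd hs
    by_cases hi : i < cs.length
    · have hdrop : cs.drop i = cs[i] :: cs.drop (i + 1) := List.drop_eq_getElem_cons hi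
      rw [runA, dif_pos hi, hdrop, goB, findPat_eq _ _ hs]
      cases hfp : findPatB (i : Int) patterns with
      | some p =>
        simp only
        by_cases hk : p.toList.length = 0
        · rw [if_pos hk]
          have h1 : runA patterns cs (i + 1) ((i : Int) + (p.toList.length : Int) - 1)
              = goB patterns (i + 1) (cs.drop (i + 1)) := by
            apply ih (cs.length - (i + 1)) (by omega) (i + 1) _ rfl
            push_cast; omega
          rw [h1]
          simp
        · rw [if_neg hk]
          set k := p.toList.length with hkdef
          have hk1 : 1 ≤ k := Nat.one_le_iff_ne_zero.mpr hk
          have h2 : runA patterns cs (i + 1) ((i : Int) + (k : Int) - 1)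
              = runA patterns cs (i + k) ((i : Int) + (k : Int) - 1) := by
            have := runA_add patterns cs (k - 1) (i + 1) ((i : Int) + (k : Int) - 1)
              (by push_cast [Nat.cast_sub hk1]; omega)
            rw [this]
            congr 1
            omega
          have h3 : runA patterns cs (i + k) ((i : Int) + (k : Int) - 1)
              = goB patterns (i + k) (cs.drop (i + k)) := by
            by_cases hik : i + k < cs.length
            · exact ih (cs.length - (i + k)) (by omega) (i + k) _ rfl (by push_cast; omega)
            · rw [runA, dif_neg (by omega), List.drop_eq_nil_of_le (by omega)]
              simp [goB]
          rw [h2, h3]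
          have hdd : (cs.drop (i + 1)).drop (k - 1) = cs.drop (i + k) := by
            rw [List.drop_drop]
            congr 1
            omega
          rw [hdd]
      | none =>
        simp only [if_pos hs]
        have hg : PySem.List.pyGetD cs (i : Int) ' ' = cs[i] := by
          rw [PySem.List.pyGetD_natCast]
          exact List.getD_eq_getElem cs ' ' hi
        rw [hg]
        have h1 : runA patterns cs (i + 1) skip = goB patterns (i + 1) (cs.drop (i + 1)) := by
          apply ih (cs.length - (i + 1)) (by omega) (i + 1) skip rfl
          push_cast; omega
        rw [h1]
        simp
    · rw [runA, dif_neg hi, List.drop_eq_nil_of_le (by omega)]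
      simp [goB]

-- ===== VERDICT (by name: the statement is the Claim_ definition above) =====
theorem encode_with_patterns_spec : Claim_equal_encode_with_patterns := by
  intro data patterns _
  unfold Spec_encode_with_patterns encode_with_patterns encode_with_patterns_alt
  rw [List.range_eq_range',
    foldA patterns data.toList data.toList.length 0 ([], -1) (by omega),
    runA_eq_goB patterns data.toList data.toList.length 0 (-1) (by omega) (by omega)]
  simp
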